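-- pv_equiv track=rewrite | github.com/MeeshMakes/ACAGi.py | Dev_Logic/error_center.py | _primary_category
-- ===== SOURCE A (Python) =====
-- from typing import Callable, Dict, Optional, Sequence, Set
--
-- def _primary_category(categories: Set[str]) -> str:
--     if not categories:
--         return "Runtime"
--     ordered = sorted(categories)
--     for name in ordered:
--         if name != "Runtime":
--             return name
--     return ordered[0]
-- ===== SOURCE B (Python) =====
-- def _primary_category(categories):
--     best = None
--     for name in categories:
--         if name == "Runtime":
--             continue
--         if best is None or name < best:
--             best = name
--     return best if best is not None else "Runtime"
-- ===== Notes on version B (the rewrite author's own statement) =====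
-- stated objective: faster
-- what changed: Replaces sort-then-scan with a single running-min pass over the set that skips 'Runtime' and falls back to 'Runtime' when no other category exists.
import Mathlib
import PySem

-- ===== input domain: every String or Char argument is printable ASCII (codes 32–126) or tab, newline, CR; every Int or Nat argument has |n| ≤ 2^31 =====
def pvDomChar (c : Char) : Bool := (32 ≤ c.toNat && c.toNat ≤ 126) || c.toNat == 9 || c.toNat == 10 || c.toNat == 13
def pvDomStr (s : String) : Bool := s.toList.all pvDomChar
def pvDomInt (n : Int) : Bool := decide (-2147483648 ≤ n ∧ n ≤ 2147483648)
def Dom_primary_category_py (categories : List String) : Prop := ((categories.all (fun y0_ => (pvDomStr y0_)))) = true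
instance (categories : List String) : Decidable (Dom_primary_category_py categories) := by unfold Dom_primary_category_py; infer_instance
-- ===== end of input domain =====

-- B replaces A's sort-then-scan with a single running-min pass (skip "Runtime", fall back to "Runtime"): faster by avoiding the sort.


-- ===== PORT A =====
-- sorted(categories); return first name ≠ "Runtime", else ordered[0]
def primary_category_py (categories : List String) : String :=
  if categories = [] then "Runtime"
  else
    let ordered := PySem.List.sorted categories (fun x => x) false
    match ordered.find? (fun n => !(n == "Runtime")) with
    | some n => n
    | none => ordered.headI   -- ordered[0]: list is nonempty here, so indexing cannot raise

-- ===== PORT B =====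
-- single pass: running minimum over the names that are not "Runtime"
def pvStepB (best : Option String) (name : String) : Option String :=
  if name = "Runtime" then best
  else match best with
    | none => some name
    | some b => if name < b then some name else best

def primary_category_py_alt (categories : List String) : String :=
  (categories.foldl pvStepB none).getD "Runtime"

-- ===== PRECONDITION & SPEC =====
def Spec_primary_category_py (categories : List String) (out : String) : Prop := out = primary_category_py_alt categories
instance (categories : List String) (out : String) : Decidable (Spec_primary_category_py categories out) := by unfold Spec_primary_category_py; infer_instance

-- ===== CLAIM (what is proved, stated in full; the proofs are below) =====
def Claim_equal_primary_category_py : Prop := ∀ (categories : List String), Dom_primary_category_py categories → Spec_primary_category_py categories (primary_category_py categories)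

-- ===== LEMMAS AND PROOFS =====

-- B's fold with a seeded accumulator is the running min over the non-"Runtime" elements
theorem pvFoldB_some (xs : List String) : ∀ (b : String),
    xs.foldl pvStepB (some b) = some ((xs.filter (fun n => !(n == "Runtime"))).foldl min b) := by
  induction xs with
  | nil => intro b; simp
  | cons x t ih =>
    intro b
    by_cases hx : x = "Runtime"
    · simp [hx, pvStepB, ih]
    · by_cases h : x < b
      · rw [List.foldl_cons, show pvStepB (some b) x = some x from by simp [pvStepB, hx, h], ih]
        simp [hx, min_eq_right (le_of_lt h)]
      · rw [List.foldl_cons, show pvStepB (some b) x = some b from by simp [pvStepB, hx, h], ih]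
        simp [hx, min_eq_left (not_lt.mp h)]

-- B's fold from none is Python's min over the filtered list (none when empty)
theorem pvFoldB_none (xs : List String) :
    xs.foldl pvStepB none =
      PySem.List.min? (xs.filter (fun n => !(n == "Runtime"))) (fun y => y) := by
  induction xs with
  | nil => simp [PySem.List.min?]
  | cons x t ih =>
    by_cases hx : x = "Runtime"
    · simp [hx, pvStepB, ih]
    · rw [List.foldl_cons, show pvStepB none x = some x from by simp [pvStepB, hx],
          pvFoldB_some, List.filter_cons_of_pos (by simp [hx]), PySem.List.min?_id_cons]

-- find? is the head of the filtered list
theorem pvFind?_eq_head?_filter (p : String → Bool) (xs : List String) :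
    xs.find? p = (xs.filter p).head? := by
  induction xs with
  | nil => rfl
  | cons x t ih =>
    cases h : p x
    · rw [List.find?_cons_of_neg (by simp [h]), List.filter_cons_of_neg (by simp [h]), ih]
    · rw [List.find?_cons_of_pos h, List.filter_cons_of_pos h, List.head?_cons]

-- ===== VERDICT (by name: the statement is the Claim_ definition above) =====
theorem primary_category_py_spec : Claim_equal_primary_category_py := by
  intro categories _
  unfold Spec_primary_category_py primary_category_py primary_category_py_alt
  rw [pvFoldB_none]
  set p : String → Bool := fun n => !(n == "Runtime") with hp
  by_cases hnil : categories = []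
  · subst hnil; simp [PySem.List.min?]
  · simp only [if_neg hnil]
    set ordered := PySem.List.sorted categories (fun x => x) false with hord
    have hperm : (ordered.filter p).Perm (categories.filter p) :=
      (PySem.List.sorted_perm categories (fun x => x) false).filter p
    rw [pvFind?_eq_head?_filter]
    cases hF : categories.filter p with
    | nil =>
      -- no non-"Runtime" element: filtered sorted list is empty too
      have h0 : ordered.filter p = [] := List.Perm.eq_nil (hF ▸ hperm)
      simp only [h0, List.head?_nil, PySem.List.min?]
      -- ordered.headI = "Runtime": every element of categories is "Runtime"
      have hmemR : ∀ y ∈ ordered, y = "Runtime" := by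
        intro y hy
        have hyc : y ∈ categories := (PySem.List.mem_sorted ..).mp hy
        by_contra hne
        have : y ∈ categories.filter p := by
          simp [List.mem_filter, hyc, hp, hne]
        simp [hF] at this
      have hone : ordered ≠ [] := by
        intro h
        have hop : ordered.Perm categories := PySem.List.sorted_perm categories (fun x => x) false
        rw [h] at hop
        exact hnil hop.symm.eq_nil
      cases hcase : ordered with
      | nil => exact absurd hcase hone
      | cons z zs => simpa using hmemR z (by simp [hcase])
    | cons y t =>
      -- some non-"Runtime" element: both sides are the minimum of the filtered list
      have hm : PySem.List.min? (y :: t) (fun y => y) = some (t.foldl min y) :=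
        PySem.List.min?_id_cons y t
      set m : String := t.foldl min y with hmdef
      rw [hm]
      have hmin : ∀ z ∈ y :: t, m ≤ z := fun z hz => PySem.List.min?_isMin hm z hz
      have hmmem : m ∈ y :: t := PySem.List.min?_mem hm
      -- the filtered sorted list is nonempty; its head is the min
      cases hOF : ordered.filter p with
      | nil =>
        have h1 : (categories.filter p).Perm ([] : List String) := hOF ▸ hperm.symm
        rw [hF] at h1
        exact absurd h1.eq_nil (by simp)
      | cons z zs =>
        simp only [List.head?_cons, Option.getD_some]
        have hzmem : z ∈ categories.filter p :=
          hperm.mem_iff.mp (by simp [hOF])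
        have hzmem' : z ∈ y :: t := hF ▸ hzmem
        -- z ≤ every element of the filtered list (sorted, filter preserves order)
        have hpair : (ordered.filter p).Pairwise (fun a b => a ≤ b) :=
          (PySem.List.sorted_pairwise categories (fun x => x)).sublist List.filter_sublist
        have hzle : ∀ w ∈ zs, z ≤ w := by
          rw [hOF] at hpair
          exact fun w hw => (List.pairwise_cons.mp hpair).1 w hw
        have hzlem : z ≤ m := by
          have hmm : m ∈ ordered.filter p := hperm.mem_iff.mpr (hF ▸ hmmem)
          rw [hOF] at hmm
          rcases List.mem_cons.mp hmm with h | h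
          · exact le_of_eq h.symm
          · exact hzle m h
        exact le_antisymm hzlem (hmin z hzmem')
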